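-- pv_equiv track=rewrite | github.com/DoctorJeal/Python-Dictionaries-Challenge-Project---Hurricanes | script.py | cat_cane_by_mortality_rating
-- ===== SOURCE A (Python) =====
-- hurricane_mortality_ratings = {}
--
-- def cat_cane_by_mortality_rating(data):
--     hurricane_mortality_ratings[0] = []
--     hurricane_mortality_ratings[1] = []
--     hurricane_mortality_ratings[2] = []
--     hurricane_mortality_ratings[3] = []
--     hurricane_mortality_ratings[4] = []
--
--     for cane in data:
--         if data[cane]['Deaths'] < 100:
--             hurricane_mortality_ratings[0].append(cane)
--         elif data[cane]['Deaths'] < 500: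
--             hurricane_mortality_ratings[1].append(cane)
--         elif data[cane]['Deaths'] < 1000:
--             hurricane_mortality_ratings[2].append(cane)
--         elif data[cane]['Deaths'] < 10000:
--             hurricane_mortality_ratings[3].append(cane)
--         else:
--             hurricane_mortality_ratings[4].append(cane)
--     return hurricane_mortality_ratings
-- ===== SOURCE B (Python) =====
-- hurricane_mortality_ratings = {}
--
-- THRESHOLDS = [100, 500, 1000, 10000]
--
--
-- def _rating(deaths):
--     # number of thresholds the death count has reached = bucket index
--     return sum(deaths >= t for t in THRESHOLDS)
--
--
-- def cat_cane_by_mortality_rating(data):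
--     for i in range(5):
--         hurricane_mortality_ratings[i] = [
--             cane for cane in data if _rating(data[cane]['Deaths']) == i
--         ]
--     return hurricane_mortality_ratings
-- ===== Notes on version B (the rewrite author's own statement) =====
-- stated objective: alternative
-- what changed: Replaces the per-hurricane if-elif comparison ladder with a threshold-counting rating function (bucket index = number of thresholds reached) and builds each of the 5 buckets with its own filtering comprehension, instead of dispatching each cane once through the ladder.
import Mathlib
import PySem

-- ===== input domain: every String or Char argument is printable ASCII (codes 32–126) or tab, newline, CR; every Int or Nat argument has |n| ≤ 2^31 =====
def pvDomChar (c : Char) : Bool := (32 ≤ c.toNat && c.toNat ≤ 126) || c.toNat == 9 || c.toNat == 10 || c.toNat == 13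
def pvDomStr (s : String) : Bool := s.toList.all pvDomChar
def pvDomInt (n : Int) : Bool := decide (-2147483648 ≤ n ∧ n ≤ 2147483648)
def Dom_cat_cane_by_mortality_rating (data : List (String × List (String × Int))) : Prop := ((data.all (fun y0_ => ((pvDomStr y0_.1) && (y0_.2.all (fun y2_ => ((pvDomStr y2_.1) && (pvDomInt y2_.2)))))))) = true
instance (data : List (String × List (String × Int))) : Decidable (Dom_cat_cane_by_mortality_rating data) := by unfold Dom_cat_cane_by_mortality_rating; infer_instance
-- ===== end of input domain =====

-- B replaces A's per-hurricane if-elif ladder with a threshold-counting rating index and five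
-- per-bucket filtering passes (objective: alternative, same O(n) cost). Both write the module-level
-- dict; equivalence is about the returned dict value.


-- data[cane]['Deaths']: first-match lookup in the inner record; Pre_ guarantees the key is present,
-- so the .getD 0 default is never taken on admitted inputs (both ports share this field access).
def pvDeaths (rec : List (String × Int)) : Int :=
  ((rec.find? (fun q => q.1 == "Deaths")).map (·.2)).getD 0

-- ===== PORT A =====
def cat_cane_by_mortality_rating (data : List (String × List (String × Int))) : List (Int × List String) :=
  let r : PySem.Dict Int (List String) :=
    (((((PySem.Dict.empty.insert 0 []).insert 1 []).insert 2 []).insert 3 []).insert 4 [])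
  -- 'for cane in data': data is a dict, so each key appears once and data[cane] is its record
  let r := data.foldl (fun r p =>
      let d := pvDeaths p.2
      if d < 100 then r.insert 0 (r.getD 0 [] ++ [p.1])
      else if d < 500 then r.insert 1 (r.getD 1 [] ++ [p.1])
      else if d < 1000 then r.insert 2 (r.getD 2 [] ++ [p.1])
      else if d < 10000 then r.insert 3 (r.getD 3 [] ++ [p.1])
      else r.insert 4 (r.getD 4 [] ++ [p.1])) r
  r.items

-- ===== PORT B =====
def pvThresholds : List Int := [100, 500, 1000, 10000]

-- sum(deaths >= t for t in THRESHOLDS)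
def pvRatingB (deaths : Int) : Int :=
  pvThresholds.foldl (fun acc t => acc + (if deaths ≥ t then 1 else 0)) 0

def cat_cane_by_mortality_rating_alt (data : List (String × List (String × Int))) : List (Int × List String) :=
  let r := (PySem.List.pyRange 0 5 1).foldl
      (fun (r : PySem.Dict Int (List String)) i =>
        r.insert i ((data.filter (fun p => pvRatingB (pvDeaths p.2) == i)).map (·.1)))
      PySem.Dict.empty
  r.items

-- ===== PRECONDITION & SPEC =====
-- Pre_ excludes exactly the inputs where some hurricane's record lacks the 'Deaths' key, on which
-- the Python A raises KeyError.
def Pre_cat_cane_by_mortality_rating (data : List (String × List (String × Int))) : Prop :=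
  (data.all (fun p => p.2.any (fun q => q.1 == "Deaths"))) = true
instance (data : List (String × List (String × Int))) : Decidable (Pre_cat_cane_by_mortality_rating data) := by unfold Pre_cat_cane_by_mortality_rating; infer_instance

def pvWitness_cat_cane_by_mortality_rating : (List (String × List (String × Int))) :=
  [("Cuba I", [("Deaths", 90)]), ("Katrina", [("Deaths", 1836)])]

def Spec_cat_cane_by_mortality_rating (data : List (String × List (String × Int))) (out : List (Int × List String)) : Prop := out = cat_cane_by_mortality_rating_alt data
instance (data : List (String × List (String × Int))) (out : List (Int × List String)) : Decidable (Spec_cat_cane_by_mortality_rating data out) := by unfold Spec_cat_cane_by_mortality_rating; infer_instance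

-- ===== CLAIM (what is proved, stated in full; the proofs are below) =====
def Claim_equal_cat_cane_by_mortality_rating : Prop := ∀ (data : List (String × List (String × Int))), Dom_cat_cane_by_mortality_rating data → Pre_cat_cane_by_mortality_rating data → Spec_cat_cane_by_mortality_rating data (cat_cane_by_mortality_rating data)

-- ===== LEMMAS AND PROOFS =====

-- the bucket B assembles for index i
def pvBucket (data : List (String × List (String × Int))) (i : Int) : List String :=
  (data.filter (fun p => pvRatingB (pvDeaths p.2) == i)).map (·.1)

theorem pvRatingB_eq (d : Int) :
    pvRatingB d = if d < 100 then 0 else if d < 500 then 1 else if d < 1000 then 2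
      else if d < 10000 then 3 else 4 := by
  simp only [pvRatingB, pvThresholds, List.foldl]
  split_ifs <;> omega

theorem pvBucket_cons (p : String × List (String × Int))
    (rest : List (String × List (String × Int))) (i : Int) :
    pvBucket (p :: rest) i =
      if pvRatingB (pvDeaths p.2) = i then p.1 :: pvBucket rest i else pvBucket rest i := by
  simp only [pvBucket, List.filter_cons]
  by_cases h : pvRatingB (pvDeaths p.2) = i <;> simp [h]

theorem pvIns0 (a0 a1 a2 a3 a4 : List String) (w : List String) :
    (PySem.Dict.mk [((0:Int), a0), (1, a1), (2, a2), (3, a3), (4, a4)]).insert 0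
      ((PySem.Dict.mk [((0:Int), a0), (1, a1), (2, a2), (3, a3), (4, a4)]).getD 0 [] ++ w)
    = PySem.Dict.mk [((0:Int), a0 ++ w), (1, a1), (2, a2), (3, a3), (4, a4)] := by
  simp [PySem.Dict.insert, PySem.Dict.getD, PySem.Dict.get?, PySem.Dict.contains]

theorem pvIns1 (a0 a1 a2 a3 a4 : List String) (w : List String) :
    (PySem.Dict.mk [((0:Int), a0), (1, a1), (2, a2), (3, a3), (4, a4)]).insert 1
      ((PySem.Dict.mk [((0:Int), a0), (1, a1), (2, a2), (3, a3), (4, a4)]).getD 1 [] ++ w)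
    = PySem.Dict.mk [((0:Int), a0), (1, a1 ++ w), (2, a2), (3, a3), (4, a4)] := by
  simp [PySem.Dict.insert, PySem.Dict.getD, PySem.Dict.get?, PySem.Dict.contains]

theorem pvIns2 (a0 a1 a2 a3 a4 : List String) (w : List String) :
    (PySem.Dict.mk [((0:Int), a0), (1, a1), (2, a2), (3, a3), (4, a4)]).insert 2
      ((PySem.Dict.mk [((0:Int), a0), (1, a1), (2, a2), (3, a3), (4, a4)]).getD 2 [] ++ w)
    = PySem.Dict.mk [((0:Int), a0), (1, a1), (2, a2 ++ w), (3, a3), (4, a4)] := by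
  simp [PySem.Dict.insert, PySem.Dict.getD, PySem.Dict.get?, PySem.Dict.contains]

theorem pvIns3 (a0 a1 a2 a3 a4 : List String) (w : List String) :
    (PySem.Dict.mk [((0:Int), a0), (1, a1), (2, a2), (3, a3), (4, a4)]).insert 3
      ((PySem.Dict.mk [((0:Int), a0), (1, a1), (2, a2), (3, a3), (4, a4)]).getD 3 [] ++ w)
    = PySem.Dict.mk [((0:Int), a0), (1, a1), (2, a2), (3, a3 ++ w), (4, a4)] := by
  simp [PySem.Dict.insert, PySem.Dict.getD, PySem.Dict.get?, PySem.Dict.contains]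

theorem pvIns4 (a0 a1 a2 a3 a4 : List String) (w : List String) :
    (PySem.Dict.mk [((0:Int), a0), (1, a1), (2, a2), (3, a3), (4, a4)]).insert 4
      ((PySem.Dict.mk [((0:Int), a0), (1, a1), (2, a2), (3, a3), (4, a4)]).getD 4 [] ++ w)
    = PySem.Dict.mk [((0:Int), a0), (1, a1), (2, a2), (3, a3), (4, a4 ++ w)] := by
  simp [PySem.Dict.insert, PySem.Dict.getD, PySem.Dict.get?, PySem.Dict.contains]

-- A's fold over an accumulator dict already holding the five buckets
theorem pvFoldA (data : List (String × List (String × Int)))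
    (a0 a1 a2 a3 a4 : List String) :
    (data.foldl (fun (r : PySem.Dict Int (List String)) p =>
      let d := pvDeaths p.2
      if d < 100 then r.insert 0 (r.getD 0 [] ++ [p.1])
      else if d < 500 then r.insert 1 (r.getD 1 [] ++ [p.1])
      else if d < 1000 then r.insert 2 (r.getD 2 [] ++ [p.1])
      else if d < 10000 then r.insert 3 (r.getD 3 [] ++ [p.1])
      else r.insert 4 (r.getD 4 [] ++ [p.1]))
      (PySem.Dict.mk [((0:Int), a0), (1, a1), (2, a2), (3, a3), (4, a4)])).items
    = [(0, a0 ++ pvBucket data 0), (1, a1 ++ pvBucket data 1), (2, a2 ++ pvBucket data 2),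
       (3, a3 ++ pvBucket data 3), (4, a4 ++ pvBucket data 4)] := by
  induction data generalizing a0 a1 a2 a3 a4 with
  | nil => simp [pvBucket]
  | cons p rest ih =>
    have hr := pvRatingB_eq (pvDeaths p.2)
    simp only [List.foldl_cons]
    by_cases h0 : pvDeaths p.2 < 100
    · rw [if_pos h0] at hr ⊢
      rw [pvIns0, ih]
      simp [pvBucket_cons, hr]
    rw [if_neg h0] at hr ⊢
    by_cases h1 : pvDeaths p.2 < 500
    · rw [if_pos h1] at hr ⊢
      rw [pvIns1, ih]
      simp [pvBucket_cons, hr]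
    rw [if_neg h1] at hr ⊢
    by_cases h2 : pvDeaths p.2 < 1000
    · rw [if_pos h2] at hr ⊢
      rw [pvIns2, ih]
      simp [pvBucket_cons, hr]
    rw [if_neg h2] at hr ⊢
    by_cases h3 : pvDeaths p.2 < 10000
    · rw [if_pos h3] at hr ⊢
      rw [pvIns3, ih]
      simp [pvBucket_cons, hr]
    rw [if_neg h3] at hr ⊢
    rw [pvIns4, ih]
    simp [pvBucket_cons, hr]

theorem pvAltItems (data : List (String × List (String × Int))) :
    cat_cane_by_mortality_rating_alt data
      = [(0, pvBucket data 0), (1, pvBucket data 1), (2, pvBucket data 2),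
         (3, pvBucket data 3), (4, pvBucket data 4)] := by
  simp only [cat_cane_by_mortality_rating_alt]
  rw [show PySem.List.pyRange 0 5 1 = [0, 1, 2, 3, 4] from by decide]
  simp only [List.foldl]
  simp [PySem.Dict.insert, PySem.Dict.contains, PySem.Dict.empty, pvBucket]

-- ===== VERDICT (by name: the statement is the Claim_ definition above) =====
theorem cat_cane_by_mortality_rating_spec : Claim_equal_cat_cane_by_mortality_rating := by
  intro data _ _
  unfold Spec_cat_cane_by_mortality_rating
  rw [pvAltItems]
  show (data.foldl _
      (((((PySem.Dict.empty.insert 0 []).insert 1 []).insert 2 []).insert 3 []).insert 4 [])).items = _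
  rw [show (((((PySem.Dict.empty.insert (0 : Int) ([] : List String)).insert 1 []).insert 2 []).insert 3 []).insert 4 [])
        = PySem.Dict.mk [((0:Int), []), (1, []), (2, []), (3, []), (4, [])] from by decide]
  have h := pvFoldA data [] [] [] [] []
  simp only [List.nil_append] at h
  exact h
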